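-- pv_equiv track=rewrite | github.com/qpzm/PS | programmers/kakao-blind-2020/bracket.py | solution
-- ===== SOURCE A (Python) =====
-- def split_parenthesis(s):
--     cnt = 0
--     for i, c in enumerate(s):
--         if c == '(':
--             cnt += 1
--         else:
--             cnt -= 1
--
--         if cnt == 0:
--             return s[:i+1], s[i+1:]
--     return s, ""
--
-- def check(s):
--     stack = []
--     for c in s:
--         if c == '(':
--             stack.append(c)
--         elif len(stack) == 0:
--             return False
--         else:
--             stack.pop()
--
--     return len(stack) == 0
--
-- def reverse(s):
--     result = ''
--     for c in s:
--         if c == '(':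
--             result += ')'
--         else:
--             result += '('
--     return result
--
-- def solution(s):
--     if len(s) == 0:
--         return s
--     u, v = split_parenthesis(s)
--     if check(u):
--         result = u + solution(v)
--     else:
--         result = "(" + solution(v) + ")" + reverse(u[1:-1])
--
--     return result
-- ===== SOURCE B (Python) =====
-- def is_correct(seg):
--     cnt = 0
--     for c in seg:
--         cnt += 1 if c == '(' else -1
--         if cnt < 0:
--             return False
--     return cnt == 0
--
-- def flip(s):
--     return ''.join(')' if c == '(' else '(' for c in s)
--
-- def solution(s):
--     # pass 1: split the input into consecutive top-level segments (counter hits 0)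
--     segs = []
--     cur = []
--     cnt = 0
--     for c in s:
--         cur.append(c)
--         cnt += 1 if c == '(' else -1
--         if cnt == 0:
--             segs.append(''.join(cur))
--             cur = []
--     if cur:
--         segs.append(''.join(cur))
--     # pass 2: fold segments right-to-left
--     res = ''
--     for seg in reversed(segs):
--         if is_correct(seg):
--             res = seg + res
--         else:
--             res = '(' + res + ')' + flip(seg[1:-1])
--     return res
-- ===== Notes on version B (the rewrite author's own statement) =====
-- stated objective: alternative
-- what changed: Replaces A's top-down recursion (split one segment, recurse on the rest) with an explicit two-pass shape: one iterative scan that builds the whole list of top-level balanced segments, then a right-to-left fold over that list; the stack-based check becomes a running-counter check and the char-flip becomes a map/join.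
import Mathlib
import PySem

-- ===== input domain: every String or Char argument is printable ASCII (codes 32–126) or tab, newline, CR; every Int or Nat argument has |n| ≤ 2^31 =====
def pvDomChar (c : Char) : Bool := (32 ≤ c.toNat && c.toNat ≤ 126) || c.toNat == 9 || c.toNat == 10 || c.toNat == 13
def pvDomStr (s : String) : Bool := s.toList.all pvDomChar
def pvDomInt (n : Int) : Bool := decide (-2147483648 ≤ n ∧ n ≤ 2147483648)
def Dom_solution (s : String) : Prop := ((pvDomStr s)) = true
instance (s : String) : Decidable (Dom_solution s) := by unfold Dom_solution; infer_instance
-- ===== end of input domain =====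

-- B replaces A's recursion by an explicit two-pass shape: build the list of top-level
-- segments iteratively, then fold it right-to-left; objective: alternative decomposition.

-- ===== PORT A =====
-- split_parenthesis: the enumerate loop; the slices s[:i+1]/s[i+1:] are realised by
-- accumulating the already-scanned prefix (exact: pre ++ [c] is s[:i+1] at the split point).
def splitGo : List Char → List Char → Int → (List Char × List Char)
  | [], pre, _ => (pre, [])
  | c :: rest, pre, cnt =>
      let cnt' := cnt + (if c = '(' then 1 else -1)
      if cnt' = 0 then (pre ++ [c], rest) else splitGo rest (pre ++ [c]) cnt'

-- check: the stack loop (stack holds only '(' but is kept as a real list, as in A)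
def checkGo : List Char → List Char → Bool
  | [], stack => stack.length == 0
  | c :: rest, stack =>
      if c = '(' then checkGo rest (c :: stack)
      else if stack.length = 0 then false
      else checkGo rest stack.tail

-- reverse: flip each bracket, building the result character by character
def revFlip : List Char → List Char
  | [] => []
  | c :: rest => (if c = '(' then ')' else '(') :: revFlip rest

theorem splitGo_snd_le : ∀ (l pre : List Char) (cnt : Int), (splitGo l pre cnt).2.length ≤ l.length := by
  intro l
  induction l with
  | nil => intro pre cnt; simp [splitGo]
  | cons c rest ih =>
      intro pre cnt
      simp only [splitGo]
      repeat' split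
      all_goals first | exact le_trans (ih _ _) (Nat.le_succ _) | simp

theorem splitGo_cons_le (c : Char) (rest pre : List Char) (cnt : Int) :
    (splitGo (c :: rest) pre cnt).2.length ≤ rest.length := by
  simp only [splitGo]
  repeat' split
  all_goals first | simp | exact splitGo_snd_le _ _ _

def solGo : List Char → List Char
  | [] => []
  | c :: rest =>
      let p := splitGo (c :: rest) [] 0
      if checkGo p.1 [] then p.1 ++ solGo p.2
      else '(' :: (solGo p.2 ++ ')' :: revFlip ((p.1.drop 1).dropLast))  -- u[1:-1] = drop 1 then dropLast (exact for all lengths)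
termination_by l => l.length
decreasing_by
  all_goals
    show (splitGo (c :: rest) [] 0).2.length < (c :: rest).length
    exact Nat.lt_succ_of_le (splitGo_cons_le _ _ _ _)

def solution (s : String) : String := String.mk (solGo s.toList)

-- ===== PORT B =====
-- pass 1 of Source B: one left-to-right scan collecting completed top-level segments
def segsGo : List Char → List Char → Int → List (List Char)
  | [], cur, _ => if cur.isEmpty then [] else [cur]
  | c :: rest, cur, cnt =>
      let cnt' := cnt + (if c = '(' then 1 else -1)
      if cnt' = 0 then (cur ++ [c]) :: segsGo rest [] 0
      else segsGo rest (cur ++ [c]) cnt'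

-- is_correct: running-counter well-formedness check
def isCorrect : List Char → Int → Bool
  | [], cnt => cnt == 0
  | c :: rest, cnt =>
      let cnt' := cnt + (if c = '(' then 1 else -1)
      if cnt' < 0 then false else isCorrect rest cnt'

-- flip: the join of the generator expression
def flipB (l : List Char) : List Char := l.map (fun c => if c = '(' then ')' else '(')

-- pass 2 of Source B: 'for seg in reversed(segs)' accumulating on the left = right fold
def combineB (seg acc : List Char) : List Char :=
  if isCorrect seg 0 then seg ++ acc
  else '(' :: (acc ++ ')' :: flipB ((seg.drop 1).dropLast))

def solution_alt (s : String) : String :=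
  String.mk (List.foldr combineB [] (segsGo s.toList [] 0))

-- ===== PRECONDITION & SPEC =====
def Spec_solution (s : String) (out : String) : Prop := out = solution_alt s
instance (s : String) (out : String) : Decidable (Spec_solution s out) := by unfold Spec_solution; infer_instance

-- ===== CLAIM (what is proved, stated in full; the proofs are below) =====
def Claim_equal_solution : Prop := ∀ (s : String), Dom_solution s → Spec_solution s (solution s)

-- ===== LEMMAS AND PROOFS =====

-- the segment scan of B is A's split applied repeatedly
theorem segsGo_eq_split : ∀ (l cur : List Char) (cnt : Int), cur ++ l ≠ [] →
    segsGo l cur cnt = (splitGo l cur cnt).1 :: segsGo (splitGo l cur cnt).2 [] 0 := by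
  intro l
  induction l with
  | nil =>
      intro cur cnt h
      simp only [segsGo, splitGo]
      simp only [List.append_nil] at h
      simp [List.isEmpty_iff, h]
  | cons c rest ih =>
      intro cur cnt _
      simp only [segsGo, splitGo]
      repeat' split
      all_goals first | rfl | exact ih (cur ++ [c]) _ (by simp)

-- A's stack check equals B's counter check (the stack is only ever measured by length)
theorem checkGo_eq_isCorrect : ∀ (l stack : List Char),
    checkGo l stack = isCorrect l (stack.length : Int) := by
  intro l
  induction l with
  | nil => intro stack; simp [checkGo, isCorrect]
  | cons c rest ih =>
      intro stack
      simp only [checkGo, isCorrect]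
      by_cases hc : c = '('
      · have hnl : ¬ ((stack.length : Int) + (if c = '(' then (1:Int) else -1) < 0) := by
          rw [if_pos hc]; omega
        rw [if_pos hc, if_neg hnl, ih]
        congr 1
        rw [if_pos hc]; push_cast [List.length_cons]; ring
      · rw [if_neg hc]
        cases stack with
        | nil =>
            have hlt : ((([]:List Char).length : Int) + (if c = '(' then (1:Int) else -1) < 0) := by
              rw [if_neg hc]; norm_num
            rw [if_pos hlt]
            simp
        | cons a t =>
            have hne : ¬ ((a :: t).length = 0) := by simp
            have hnl : ¬ (((a :: t).length : Int) + (if c = '(' then (1:Int) else -1) < 0) := by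
              rw [if_neg hc]; push_cast [List.length_cons]; omega
            rw [if_neg hne, if_neg hnl, List.tail_cons, ih]
            congr 1
            rw [if_neg hc]; push_cast [List.length_cons]; ring

theorem revFlip_eq_flipB : ∀ (l : List Char), revFlip l = flipB l := by
  intro l
  induction l with
  | nil => rfl
  | cons c rest ih => simp [revFlip, flipB, List.map] at *; exact ih

theorem solGo_eq_foldr : ∀ (n : Nat) (l : List Char), l.length ≤ n →
    solGo l = List.foldr combineB [] (segsGo l [] 0) := by
  intro n
  induction n with
  | zero =>
      intro l hl
      have : l = [] := List.eq_nil_of_length_eq_zero (Nat.le_zero.mp hl)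
      simp [this, solGo, segsGo]
  | succ n ih =>
      intro l hl
      cases l with
      | nil => simp [solGo, segsGo]
      | cons c rest =>
          have hseg := segsGo_eq_split (c :: rest) [] 0 (by simp)
          rw [hseg, List.foldr_cons]
          have hlt : (splitGo (c :: rest) [] 0).2.length ≤ n := by
            have : (splitGo (c :: rest) [] 0).2.length ≤ rest.length :=
              splitGo_cons_le _ _ _ _
            have hb : (c :: rest).length = rest.length + 1 := rfl
            omega
          rw [← ih _ hlt]
          simp only [solGo, combineB]
          rw [checkGo_eq_isCorrect _ []]
          simp [revFlip_eq_flipB]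

-- ===== VERDICT (by name: the statement is the Claim_ definition above) =====
theorem solution_spec : Claim_equal_solution := by
  intro s _
  unfold Spec_solution solution solution_alt
  rw [solGo_eq_foldr s.toList.length s.toList le_rfl]
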